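-- pv_equiv track=rewrite | github.com/pypy/pypy | pypy/translator/test/snippet.py | time_waster
-- ===== SOURCE A (Python) =====
-- def time_waster(n):
--     """Arbitrary test function"""
--     i = 0
--     x = 1
--     while i<n:
--         j = 0
--         while j<=i:
--             j = j + 1
--             x = x + (i&j)
--         i = i + 1
--     return x
-- ===== SOURCE B (Python) =====
-- def _count_bit(N, b):
--     # number of j in [0, N) whose bit b is set (closed form)
--     full = (N >> (b + 1)) << b
--     rem = (N & ((1 << (b + 1)) - 1)) - (1 << b)
--     return full + (rem if rem > 0 else 0)
--
--
-- def time_waster(n):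
--     # Per-bit counting: for each i, sum of i&j over j in [1, i+1] equals
--     # sum over set bits b of i of 2^b * (#j in [0, i+2) with bit b set).
--     x = 1
--     for i in range(n):
--         b = 0
--         while (1 << b) <= i + 1:
--             if (i >> b) & 1:
--                 x += _count_bit(i + 2, b) << b
--             b += 1
--     return x
-- ===== Notes on version B (the rewrite author's own statement) =====
-- stated objective: faster
-- what changed: Replaces the O(n^2) nested loop with a per-bit closed-form count: for each i, the inner sum of i&j over j is computed as sum over set bits b of i of 2^b times the closed-form count of j<i+2 with bit b set.
import Mathlib
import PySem

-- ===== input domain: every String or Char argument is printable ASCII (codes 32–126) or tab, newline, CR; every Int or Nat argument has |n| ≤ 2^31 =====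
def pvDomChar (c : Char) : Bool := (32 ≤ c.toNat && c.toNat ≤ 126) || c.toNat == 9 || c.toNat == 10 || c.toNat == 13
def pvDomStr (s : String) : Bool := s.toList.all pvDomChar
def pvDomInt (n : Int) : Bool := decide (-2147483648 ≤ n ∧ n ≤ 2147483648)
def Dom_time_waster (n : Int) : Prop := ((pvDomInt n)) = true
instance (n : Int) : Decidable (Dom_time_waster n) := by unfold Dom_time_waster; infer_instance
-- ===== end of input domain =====

-- B replaces A's O(n^2) nested loop by a per-bit closed-form count; proved to return A's exact value.

-- ===== PORT A =====
-- inner while loop: 'while j<=i: j=j+1; x=x+(i&j)'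
def twInner (i j x : Int) : Int :=
  if j ≤ i then twInner i (j + 1) (x + PySem.Int.band i (j + 1)) else x
termination_by (i + 1 - j).toNat
decreasing_by omega

-- outer while loop: 'while i<n: <inner with j=0>; i=i+1'
def twOuter (n i x : Int) : Int :=
  if i < n then twOuter n (i + 1) (twInner i 0 x) else x
termination_by (n - i).toNat
decreasing_by omega

def time_waster (n : Int) : Int := twOuter n 0 1

-- ===== PORT B =====
-- _count_bit(N, b): number of j in [0, N) whose bit b is set; Nat's truncated
-- subtraction is exactly Python's '(rem if rem > 0 else 0)' for these
-- nonnegative values, and the mask 'N & ((1 << (b+1)) - 1)' is exact on them.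
def cntBit (N b : Nat) : Nat :=
  ((N >>> (b + 1)) <<< b) + ((N &&& ((1 <<< (b + 1)) - 1)) - (1 <<< b))

-- the 'while (1 << b) <= i + 1' loop of B, accumulating into x
def bitLoop (i b acc : Nat) : Nat :=
  if 1 <<< b ≤ i + 1 then
    bitLoop i (b + 1) (if (i >>> b) &&& 1 = 1 then acc + (cntBit (i + 2) b <<< b) else acc)
  else acc
termination_by (i + 2) - (1 <<< b)
decreasing_by
  simp only [Nat.one_shiftLeft] at *
  have h1 : 2 ^ b < 2 ^ (b + 1) := Nat.pow_lt_pow_right (by omega) (by omega)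
  omega

-- 'for i in range(n)': i only takes the nonnegative values 0..n-1, computed in Nat
def time_waster_alt (n : Int) : Int :=
  ((List.range n.toNat).foldl (fun x i => bitLoop i 0 x) 1 : Nat)

-- ===== PRECONDITION & SPEC =====
def Spec_time_waster (n : Int) (out : Int) : Prop := out = time_waster_alt n
instance (n : Int) (out : Int) : Decidable (Spec_time_waster n out) := by unfold Spec_time_waster; infer_instance

-- ===== CLAIM (what is proved, stated in full; the proofs are below) =====
def Claim_equal_time_waster : Prop := ∀ (n : Int), Dom_time_waster n → Spec_time_waster n (time_waster n)

-- ===== LEMMAS AND PROOFS =====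

-- number of j < N with bit b set, as a sum
def cnt (N b : Nat) : Nat := ∑ j ∈ Finset.range N, (if j.testBit b then 1 else 0)

-- inner sum of A for a fixed i (over j = 0..i+1; the j = 0 term is 0)
def Snat (i : Nat) : Nat := ∑ j ∈ Finset.range (i + 2), (i &&& j)

lemma cnt_succ (N b : Nat) : cnt (N + 1) b = cnt N b + (if N.testBit b then 1 else 0) := by
  unfold cnt; rw [Finset.sum_range_succ]

lemma cntBit_succ (N b : Nat) :
    cntBit (N + 1) b = cntBit N b + (if N.testBit b then 1 else 0) := by
  simp only [cntBit, Nat.shiftRight_eq_div_pow, Nat.shiftLeft_eq, one_mul,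
    Nat.and_two_pow_sub_one_eq_mod, Nat.testBit_eq_decide_div_mod_eq, decide_eq_true_eq]
  have hpow : (2:Nat) ^ (b + 1) = 2 * 2 ^ b := by rw [pow_succ]; ring
  rw [hpow]
  have hP : 0 < 2 ^ b := Nat.two_pow_pos b
  generalize hg : (2:Nat) ^ b = P at hP ⊢
  have hm1 := Nat.div_add_mod N (2 * P)
  have hm2 := Nat.div_add_mod (N + 1) (2 * P)
  have hr1 : N % (2 * P) < 2 * P := Nat.mod_lt _ (by omega)
  have hr2 : (N + 1) % (2 * P) < 2 * P := Nat.mod_lt _ (by omega)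
  have hA1 : N / (2 * P) ≤ (N + 1) / (2 * P) := Nat.div_le_div_right (by omega)
  have hA2 : (N + 1) / (2 * P) ≤ N / (2 * P) + 1 := by
    have h := Nat.div_le_div_right (c := 2 * P) (show N + 1 ≤ N + 2 * P by omega)
    rwa [Nat.add_div_right _ (by omega)] at h
  have hNP : N / P = N % (2 * P) / P + 2 * (N / (2 * P)) := by
    conv_lhs => rw [← hm1]
    rw [show 2 * P * (N / (2 * P)) + N % (2 * P) = N % (2 * P) + P * (2 * (N / (2 * P))) by ring,
      Nat.add_mul_div_left _ _ hP]
  have hcase : (N % (2 * P) < P ∧ N % (2 * P) / P = 0)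
      ∨ (P ≤ N % (2 * P) ∧ N % (2 * P) / P = 1) := by
    rcases Nat.lt_or_ge (N % (2 * P)) P with h | h
    · exact Or.inl ⟨h, Nat.div_eq_of_lt h⟩
    · exact Or.inr ⟨h, Nat.div_eq_of_lt_le (by omega) (by omega)⟩
  have hC : N / P % 2 = N % (2 * P) / P := by
    rcases hcase with ⟨h1, h2⟩ | ⟨h1, h2⟩ <;> rw [hNP, h2] <;> omega
  have e1 : N = 2 * (N / (2 * P) * P) + N % (2 * P) := by
    conv_lhs => rw [← hm1]
    ring
  rw [hC]
  rcases (by omega : (N + 1) / (2 * P) = N / (2 * P) ∨ (N + 1) / (2 * P) = N / (2 * P) + 1)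
    with heq | heq <;> rw [heq]
  · have e2 : N + 1 = 2 * (N / (2 * P) * P) + (N + 1) % (2 * P) := by
      conv_lhs => rw [← hm2, heq]
      ring
    rcases hcase with ⟨h1, h2⟩ | ⟨h1, h2⟩ <;> rw [h2] <;> norm_num <;> omega
  · rw [show (N / (2 * P) + 1) * P = N / (2 * P) * P + P by ring]
    have e2 : N + 1 = 2 * (N / (2 * P) * P) + 2 * P + (N + 1) % (2 * P) := by
      conv_lhs => rw [← hm2, heq]
      ring
    rcases hcase with ⟨h1, h2⟩ | ⟨h1, h2⟩ <;> rw [h2] <;> norm_num <;> omega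

lemma cntBit_eq (N b : Nat) : cntBit N b = cnt N b := by
  induction N with
  | zero => simp [cntBit, cnt]
  | succ N ih => rw [cntBit_succ, cnt_succ, ih]

lemma testBit_sum (K : Nat) : ∀ m : Nat, m < 2 ^ K →
    ∑ b ∈ Finset.range K, 2 ^ b * (if m.testBit b then 1 else 0) = m := by
  induction K with
  | zero => intro m hm; interval_cases m <;> simp
  | succ K ih =>
      intro m hm
      rw [Finset.sum_range_succ']
      have h1 : ∀ b, 2 ^ (b + 1) * (if m.testBit (b + 1) then 1 else 0)
          = 2 * (2 ^ b * (if (m / 2).testBit b then 1 else 0)) := by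
        intro b; rw [Nat.testBit_add_one, pow_succ]; ring
      rw [Finset.sum_congr rfl (fun b _ => h1 b), ← Finset.mul_sum,
        ih (m / 2) (by rw [pow_succ] at hm; omega)]
      have h0 : m.testBit 0 = decide (m % 2 = 1) := Nat.testBit_zero m
      rw [h0]
      simp only [pow_zero, one_mul, decide_eq_true_eq]
      split_ifs with h <;> omega

lemma sum_land (i K : Nat) (hi : i < 2 ^ K) (N : Nat) :
    ∑ j ∈ Finset.range N, (i &&& j)
      = ∑ b ∈ Finset.range K, (if i.testBit b then cnt N b * 2 ^ b else 0) := by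
  induction N with
  | zero =>
      simp [cnt]
  | succ N ih =>
      rw [Finset.sum_range_succ, ih]
      have h1 : ∀ b, (if i.testBit b then cnt (N + 1) b * 2 ^ b else 0)
          = (if i.testBit b then cnt N b * 2 ^ b else 0)
            + 2 ^ b * (if (i &&& N).testBit b then 1 else 0) := by
        intro b
        rw [cnt_succ, Nat.testBit_land]
        by_cases hib : i.testBit b <;> by_cases hnb : N.testBit b <;>
          simp [hib, hnb] <;> ring
      rw [Finset.sum_congr rfl (fun b _ => h1 b), Finset.sum_add_distrib,
        testBit_sum K (i &&& N) (lt_of_le_of_lt Nat.and_le_left hi)]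

lemma bitLoop_eq (i : Nat) : ∀ (k b acc : Nat), i + 2 ≤ 2 ^ b + k →
    bitLoop i b acc
      = acc + ∑ t ∈ Finset.Ico b (i + 2), (if i.testBit t then cntBit (i + 2) t * 2 ^ t else 0) := by
  intro k
  induction k with
  | zero =>
      intro b acc hk
      rw [bitLoop, if_neg (by rw [Nat.one_shiftLeft]; omega)]
      have hz : ∑ t ∈ Finset.Ico b (i + 2),
          (if i.testBit t then cntBit (i + 2) t * 2 ^ t else 0) = 0 :=
        Finset.sum_eq_zero (fun t ht => by
          simp only [Finset.mem_Ico] at ht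
          have hlt : i < 2 ^ t := lt_of_lt_of_le (by omega)
            (Nat.pow_le_pow_right (by omega) ht.1)
          simp [Nat.testBit_eq_false_of_lt hlt])
      omega
  | succ k ih =>
      intro b acc hk
      rw [bitLoop]
      have hcond : ((i >>> b) &&& 1 = 1) ↔ (i.testBit b = true) := by
        rw [Nat.and_one_is_mod, Nat.shiftRight_eq_div_pow, Nat.testBit_eq_decide_div_mod_eq,
          decide_eq_true_eq]
      split_ifs with h hbit
      · rw [Nat.one_shiftLeft] at h
        have hb2 : b < i + 2 := lt_of_lt_of_le Nat.lt_two_pow_self (by omega)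
        have hstep : 2 ^ b < 2 ^ (b + 1) := Nat.pow_lt_pow_right (by omega) (by omega)
        rw [ih (b + 1) _ (by omega), Finset.sum_eq_sum_Ico_succ_bot hb2, Nat.shiftLeft_eq,
          if_pos (hcond.mp hbit)]
        ring
      · rw [Nat.one_shiftLeft] at h
        have hb2 : b < i + 2 := lt_of_lt_of_le Nat.lt_two_pow_self (by omega)
        have hstep : 2 ^ b < 2 ^ (b + 1) := Nat.pow_lt_pow_right (by omega) (by omega)
        rw [ih (b + 1) _ (by omega), Finset.sum_eq_sum_Ico_succ_bot hb2,
          if_neg (fun hx => hbit (hcond.mpr hx))]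
        omega
      · rw [Nat.one_shiftLeft] at h
        have hz : ∑ t ∈ Finset.Ico b (i + 2),
            (if i.testBit t then cntBit (i + 2) t * 2 ^ t else 0) = 0 :=
          Finset.sum_eq_zero (fun t ht => by
            simp only [Finset.mem_Ico] at ht
            have hlt : i < 2 ^ t := lt_of_lt_of_le (by omega)
              (Nat.pow_le_pow_right (by omega) ht.1)
            simp [Nat.testBit_eq_false_of_lt hlt])
        omega

lemma bitLoop_zero (i acc : Nat) : bitLoop i 0 acc = acc + Snat i := by
  rw [bitLoop_eq i (i + 2) 0 acc (by simp)]
  congr 1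
  have hK : i < 2 ^ (i + 2) :=
    lt_of_lt_of_le Nat.lt_two_pow_self (Nat.pow_le_pow_right (by omega) (by omega))
  unfold Snat
  rw [sum_land i (i + 2) hK (i + 2), Finset.range_eq_Ico]
  exact (Finset.sum_congr rfl (fun t _ => by rw [cntBit_eq])).symm

lemma foldl_bitLoop (m : Nat) (a : Nat) :
    (List.range m).foldl (fun x i => bitLoop i 0 x) a = a + ∑ i ∈ Finset.range m, Snat i := by
  induction m with
  | zero => simp
  | succ m ih =>
      rw [List.range_succ, List.foldl_append, ih]
      simp only [List.foldl_cons, List.foldl_nil]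
      rw [bitLoop_zero, Finset.sum_range_succ]
      ring

lemma twInner_eq (i : Int) (hi : 0 ≤ i) : ∀ (k : Nat) (j x : Int), 0 ≤ j → i + 1 ≤ j + k → j ≤ i + 1 →
    twInner i j x
      = x + ((∑ t ∈ Finset.Ico (j.toNat + 1) (i.toNat + 2), (i.toNat &&& t) : Nat) : Int) := by
  intro k
  induction k with
  | zero =>
      intro j x hj hk hji
      rw [twInner, if_neg (by omega), Finset.Ico_eq_empty (by omega)]
      simp
  | succ k ih =>
      intro j x hj hk hji
      rw [twInner]
      split_ifs with h
      · rw [ih (j + 1) _ (by omega) (by omega) (by omega),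
          PySem.Int.band_of_nonneg hi (by omega)]
        have h1 : (j + 1).toNat = j.toNat + 1 := by omega
        rw [h1, Finset.sum_eq_sum_Ico_succ_bot (show j.toNat + 1 < i.toNat + 2 by omega)]
        push_cast
        ring
      · rw [Finset.Ico_eq_empty (by omega)]
        simp

lemma twInner_zero (i x : Int) (hi : 0 ≤ i) : twInner i 0 x = x + (Snat i.toNat : Int) := by
  have hs : Snat i.toNat = ∑ t ∈ Finset.Ico 1 (i.toNat + 2), (i.toNat &&& t) := by
    unfold Snat
    rw [Finset.range_eq_Ico, Finset.sum_eq_sum_Ico_succ_bot (by omega)]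
    simp
  rw [twInner_eq i hi (i.toNat + 1) 0 x le_rfl (by omega) (by omega)]
  simp only [Int.toNat_zero, zero_add]
  rw [hs]

lemma twOuter_eq (n : Int) : ∀ (k : Nat) (i x : Int), 0 ≤ i → n ≤ i + k →
    twOuter n i x = x + ((∑ t ∈ Finset.Ico i.toNat n.toNat, Snat t : Nat) : Int) := by
  intro k
  induction k with
  | zero =>
      intro i x hi hk
      rw [twOuter, if_neg (by omega), Finset.Ico_eq_empty (by omega)]
      simp
  | succ k ih =>
      intro i x hi hk
      rw [twOuter]
      split_ifs with h
      · rw [ih (i + 1) _ (by omega) (by omega), twInner_zero i x hi]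
        have h1 : (i + 1).toNat = i.toNat + 1 := by omega
        rw [h1, Finset.sum_eq_sum_Ico_succ_bot (show i.toNat < n.toNat by omega)]
        push_cast
        ring
      · rw [Finset.Ico_eq_empty (by omega)]
        simp

-- ===== VERDICT (by name: the statement is the Claim_ definition above) =====
theorem time_waster_spec : Claim_equal_time_waster := by
  intro n _
  unfold Spec_time_waster time_waster time_waster_alt
  rw [twOuter_eq n n.toNat 0 1 le_rfl (by omega), foldl_bitLoop]
  have h0 : (0 : Int).toNat = 0 := rfl
  rw [h0, ← Finset.range_eq_Ico]
  push_cast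
  ring
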